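-- pv_equiv track=rewrite | github.com/OscarTaboada/SIS420-2021 | 6.-A_Genetico/lab6_Grupo2.py | funcion0
-- ===== SOURCE A (Python) =====
-- def funcion0(cromosoma):
--    suma = 0
--    for i in range(len(cromosoma)):
--        if(cromosoma[i]==0):
--            suma+=0
--        else:
--            suma+=10
--    return suma
-- ===== SOURCE B (Python) =====
-- def funcion0(cromosoma):
--     n = len(cromosoma)
--
--     def go(lo, hi):
--         if hi - lo <= 0:
--             return 0
--         if hi - lo == 1:
--             return 0 if cromosoma[lo] == 0 else 10
--         mid = (lo + hi) // 2
--         return go(lo, mid) + go(mid, hi)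
--
--     return go(0, n)
-- ===== Notes on version B (the rewrite author's own statement) =====
-- stated objective: alternative
-- what changed: Replaces the left-to-right index loop with an if/else accumulator by a divide-and-conquer recursion that splits the index range at the midpoint and adds the scores of the two halves (logarithmic recursion depth, no loop or accumulator).
import Mathlib
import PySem

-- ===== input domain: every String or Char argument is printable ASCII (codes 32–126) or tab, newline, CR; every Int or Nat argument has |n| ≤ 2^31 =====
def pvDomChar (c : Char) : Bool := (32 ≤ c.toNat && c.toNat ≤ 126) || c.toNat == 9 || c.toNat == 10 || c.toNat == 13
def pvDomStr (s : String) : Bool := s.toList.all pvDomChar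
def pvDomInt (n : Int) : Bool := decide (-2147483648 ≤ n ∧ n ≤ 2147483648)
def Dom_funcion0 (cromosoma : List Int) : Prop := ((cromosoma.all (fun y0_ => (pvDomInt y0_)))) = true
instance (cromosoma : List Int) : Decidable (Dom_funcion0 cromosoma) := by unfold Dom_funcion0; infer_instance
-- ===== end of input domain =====

-- B scores the chromosome by divide-and-conquer: split the index range at the midpoint and
-- add the scores of the two halves, instead of A's left-to-right accumulator loop.
-- ===== PORT A =====
def funcion0 (cromosoma : List Int) : Int :=
  (PySem.List.pyRange 0 (cromosoma.length : Int) 1).foldl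
    (fun suma i =>
      if PySem.List.pyGetD cromosoma i 0 = 0 then suma + 0 else suma + 10) 0

-- ===== PORT B =====
-- inner helper go(lo, hi) of Source B ('<= 0' is Source B's base-case guard, kept verbatim)
def funcion0Go (cromosoma : List Int) (lo hi : Int) : Int :=
  if hi - lo ≤ 0 then 0
  else if hi - lo = 1 then
    (if PySem.List.pyGetD cromosoma lo 0 = 0 then 0 else 10)
  else
    funcion0Go cromosoma lo (PySem.Int.floordiv (lo + hi) 2) +
    funcion0Go cromosoma (PySem.Int.floordiv (lo + hi) 2) hi
termination_by (hi - lo).toNat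
decreasing_by
  all_goals rw [PySem.Int.floordiv_eq_ediv_of_pos (by omega)]; omega

def funcion0_alt (cromosoma : List Int) : Int :=
  funcion0Go cromosoma 0 (cromosoma.length : Int)

-- ===== PRECONDITION & SPEC =====
def Spec_funcion0 (cromosoma : List Int) (out : Int) : Prop := out = funcion0_alt cromosoma
instance (cromosoma : List Int) (out : Int) : Decidable (Spec_funcion0 cromosoma out) := by unfold Spec_funcion0; infer_instance

-- ===== CLAIM (what is proved, stated in full; the proofs are below) =====
def Claim_equal_funcion0 : Prop := ∀ (cromosoma : List Int), Dom_funcion0 cromosoma → Spec_funcion0 cromosoma (funcion0 cromosoma)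

-- ===== LEMMAS AND PROOFS =====
lemma funcion0Go_eq_sum (xs : List Int) :
    ∀ (m : Nat) (lo hi : Int), (hi - lo).toNat ≤ m →
      funcion0Go xs lo hi =
        ((PySem.List.pyRange lo hi 1).map
          (fun i => if PySem.List.pyGetD xs i 0 = 0 then (0 : Int) else 10)).sum := by
  intro m
  induction m with
  | zero =>
    intro lo hi h
    unfold funcion0Go
    rw [if_pos (by omega), PySem.List.pyRange_one_eq_nil (by omega)]
    simp
  | succ m ih =>
    intro lo hi h
    unfold funcion0Go
    by_cases h0 : hi - lo ≤ 0
    · rw [if_pos h0, PySem.List.pyRange_one_eq_nil (by omega)]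
      simp
    · rw [if_neg h0]
      by_cases h1 : hi - lo = 1
      · rw [if_pos h1]
        have hhi : hi = lo + 1 := by omega
        subst hhi
        rw [PySem.List.pyRange_one_singleton]
        simp
      · rw [if_neg h1]
        have hm : PySem.Int.floordiv (lo + hi) 2 = (lo + hi) / 2 :=
          PySem.Int.floordiv_eq_ediv_of_pos (by omega)
        rw [ih lo _ (by rw [hm]; omega), ih _ hi (by rw [hm]; omega),
            PySem.List.pyRange_one_append lo (PySem.Int.floordiv (lo + hi) 2) hi
              (by rw [hm]; omega) (by rw [hm]; omega),
            List.map_append, List.sum_append]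

-- ===== VERDICT (by name: the statement is the Claim_ definition above) =====
theorem funcion0_spec : Claim_equal_funcion0 := by
  intro xs _
  unfold Spec_funcion0 funcion0 funcion0_alt
  have hstep :
      (fun (suma i : Int) =>
          if PySem.List.pyGetD xs i 0 = 0 then suma + 0 else suma + 10)
        = fun suma i => suma + (if PySem.List.pyGetD xs i 0 = 0 then 0 else 10) := by
    funext s i; split <;> ring
  rw [hstep, PySem.List.foldl_add,
      funcion0Go_eq_sum xs (hi := (xs.length : Int)) (lo := 0) ((xs.length : Int) - 0).toNat
        (le_refl _)]
  simp
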